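-- pv_equiv track=rewrite | github.com/Xano-verse/ProjetosLEIC | Fundamentos da Programação/Projeto1/Projeto1.py | ordena_intersecoes
-- ===== SOURCE A (Python) =====
-- def ordena_intersecoes(t_inters):
--     l_inters = list(t_inters)
--     l_final = []
--
--     #ordena as interseções pelos números, por ordem crescente
--     l_inters.sort(key = lambda x: x[1])
--
--     #x serve para saber até que índice já ordenei em relação à letra
--     x = 0
--     try:
--         for i in range(len(l_inters)):
--             '''
--             sei que as interseções com o mesmo número estão todas juntas
--             e que os aglomerados do mesmo número estão ordenados
--             quando o número (índice 1 dos subtuplos) aumentar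
--             (mudei de aglomerado), então ordeno as interseções com
--             esse número em relação à letra
--             '''
--             if l_inters[i][1] < l_inters[i+1][1]:
--                 l_final += sorted(l_inters[x:i+1])
--                 x = i+1
--
--     #se atingimos o último número a slice irá acabar no índice igual à len
--     except IndexError:
--         l_final += sorted(l_inters[x:len(l_inters)])
--
--     return tuple(l_final)
-- ===== SOURCE B (Python) =====
-- def ordena_intersecoes(t_inters):
--     # one composite-key sort: first by the number, ties by the letter
--     return tuple(sorted(t_inters, key=lambda x: (x[1], x[0])))
-- ===== Notes on version B (the rewrite author's own statement) =====
-- stated objective: simpler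
-- what changed: Replaces A's sort-by-number followed by an index loop that detects group boundaries (via a deliberate IndexError) and sorts each group separately with a single sort under the composite key (number, letter).
import Mathlib
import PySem

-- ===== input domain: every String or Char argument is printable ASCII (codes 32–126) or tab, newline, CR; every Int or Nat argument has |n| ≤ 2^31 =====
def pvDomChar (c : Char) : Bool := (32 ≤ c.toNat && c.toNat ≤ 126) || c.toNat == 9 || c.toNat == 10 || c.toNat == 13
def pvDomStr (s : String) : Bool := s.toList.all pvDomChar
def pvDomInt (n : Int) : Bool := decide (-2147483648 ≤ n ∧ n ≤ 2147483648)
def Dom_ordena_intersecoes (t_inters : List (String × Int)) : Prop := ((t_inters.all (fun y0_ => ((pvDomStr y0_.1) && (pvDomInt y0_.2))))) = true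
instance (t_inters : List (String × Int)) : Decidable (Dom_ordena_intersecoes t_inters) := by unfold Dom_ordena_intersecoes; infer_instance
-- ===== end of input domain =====

-- B replaces A's sort-by-number plus boundary-scan-with-per-group-sort by ONE sort under the
-- composite key (number, letter); objective: simpler. Neither program mutates its argument
-- (A copies it with list(...)).

-- ===== PORT A =====
-- the for/try loop: i is the range index, x the start of the current group, l_final the output
-- accumulator; l_inters[i+1] is PySem.List.pyGet? (none = IndexError, i.e. the except branch);
-- Python's sorted(list-of-pairs) with no key compares tuples lexicographically = sorted2 fst snd.
def ordena_intersecoes_loop (l_inters : List (String × Int)) (i x : Nat)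
    (l_final : List (String × Int)) : List (String × Int) :=
  if hi : i < l_inters.length then
    match PySem.List.pyGet? l_inters ((i : Int) + 1) with
    | some nxt =>
      if l_inters[i].2 < nxt.2 then
        ordena_intersecoes_loop l_inters (i+1) (i+1)
          (l_final ++ PySem.List.sorted2
            (PySem.List.slice l_inters (some (x : Int)) (some ((i : Int) + 1)))
            (fun p => p.1) (fun p => p.2))
      else
        ordena_intersecoes_loop l_inters (i+1) x l_final
    | none =>
      -- IndexError caught: l_final += sorted(l_inters[x:len(l_inters)])
      l_final ++ PySem.List.sorted2
        (PySem.List.slice l_inters (some (x : Int)) (some (l_inters.length : Int)))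
        (fun p => p.1) (fun p => p.2)
  else l_final
termination_by l_inters.length - i

def ordena_intersecoes (t_inters : List (String × Int)) : List (String × Int) :=
  let l_inters := PySem.List.sorted t_inters (fun x => x.2) false
  ordena_intersecoes_loop l_inters 0 0 []

-- ===== PORT B =====
def ordena_intersecoes_alt (t_inters : List (String × Int)) : List (String × Int) :=
  PySem.List.sorted2 t_inters (fun x => x.2) (fun x => x.1) false

-- ===== PRECONDITION & SPEC =====
def Spec_ordena_intersecoes (t_inters : List (String × Int)) (out : List (String × Int)) : Prop := out = ordena_intersecoes_alt t_inters
instance (t_inters : List (String × Int)) (out : List (String × Int)) : Decidable (Spec_ordena_intersecoes t_inters out) := by unfold Spec_ordena_intersecoes; infer_instance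

-- ===== CLAIM (what is proved, stated in full; the proofs are below) =====
def Claim_equal_ordena_intersecoes : Prop := ∀ (t_inters : List (String × Int)), Dom_ordena_intersecoes t_inters → Spec_ordena_intersecoes t_inters (ordena_intersecoes t_inters)

-- ===== LEMMAS AND PROOFS =====

-- the composite key both programs effectively sort by: (number, letter), lexicographically
def pvK (p : String × Int) : Lex (Int × String) := toLex (p.2, p.1)

theorem pvK_inj : Function.Injective pvK := by
  intro a b h
  have h1 : (ofLex (pvK a)).1 = (ofLex (pvK b)).1 := by rw [h]
  have h2 : (ofLex (pvK a)).2 = (ofLex (pvK b)).2 := by rw [h]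
  simp only [pvK, ofLex_toLex] at h1 h2
  exact Prod.ext h2 h1

-- Python's tuple-key sort IS the single sort by the lexicographic pair key
theorem sorted2_eq_sorted_lex {α κ₁ κ₂ : Type} [LinearOrder κ₁] [LinearOrder κ₂]
    (xs : List α) (k1 : α → κ₁) (k2 : α → κ₂) :
    PySem.List.sorted2 xs k1 k2 false = PySem.List.sorted xs (fun x => toLex (k1 x, k2 x)) false := by
  have hbf : (fun (a b : α) => decide (k1 a < k1 b) || (!decide (k1 b < k1 a) && decide (k2 a < k2 b)))
      = fun a b => decide (toLex (k1 a, k2 a) < toLex (k1 b, k2 b)) := by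
    funext a b
    rw [Bool.eq_iff_iff]
    simp only [Bool.or_eq_true, Bool.and_eq_true, Bool.not_eq_true', decide_eq_true_eq,
      decide_eq_false_iff_not]
    rw [Prod.Lex.lt_iff]
    simp only [ofLex_toLex]
    constructor
    · rintro (h | ⟨hnb, h2⟩)
      · exact Or.inl h
      · rcases lt_trichotomy (k1 a) (k1 b) with h | h | h
        · exact Or.inl h
        · exact Or.inr ⟨h, h2⟩
        · exact absurd h hnb
    · rintro (h | ⟨he, h2⟩)
      · exact Or.inl h
      · exact Or.inr ⟨by rw [he]; exact lt_irrefl _, h2⟩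
  simp only [PySem.List.sorted2, PySem.List.sorted, hbf, Bool.false_eq_true, if_false]

-- sorting a constant-number group by (letter, number) = sorting it by pvK
theorem chunk_sort_eq (c : List (String × Int)) (v : Int) (hv : ∀ p ∈ c, p.2 = v) :
    PySem.List.sorted2 c (fun p => p.1) (fun p => p.2) false = PySem.List.sorted c pvK false := by
  rw [sorted2_eq_sorted_lex]
  apply PySem.List.eq_of_perm_of_pairwise_le_of_injective pvK pvK_inj
  · exact (PySem.List.sorted_perm _ _ _).trans (PySem.List.sorted_perm _ _ _).symm
  · refine List.Pairwise.imp_of_mem ?_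
      (PySem.List.sorted_pairwise c (fun p => toLex (p.1, p.2)))
    intro a b ha hb h
    have ha2 := hv a ((PySem.List.mem_sorted _ _ _ _).1 ha)
    have hb2 := hv b ((PySem.List.mem_sorted _ _ _ _).1 hb)
    rw [Prod.Lex.le_iff] at h ⊢
    simp only [ofLex_toLex, pvK] at *
    rcases h with h | ⟨he, h2⟩
    · exact Or.inr ⟨ha2.trans hb2.symm, le_of_lt h⟩
    · exact Or.inr ⟨ha2.trans hb2.symm, le_of_eq he⟩
  · exact PySem.List.sorted_pairwise c pvK

-- a pvK-sort splits over an append whose left part is strictly below the right part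
theorem sorted_append_split (a b : List (String × Int))
    (hlt : ∀ u ∈ a, ∀ v ∈ b, pvK u < pvK v) :
    PySem.List.sorted (a ++ b) pvK false =
      PySem.List.sorted a pvK false ++ PySem.List.sorted b pvK false := by
  apply PySem.List.eq_of_perm_of_pairwise_le_of_injective pvK pvK_inj
  · exact (PySem.List.sorted_perm _ _ _).trans
      (((PySem.List.sorted_perm a pvK false).append (PySem.List.sorted_perm b pvK false)).symm)
  · exact PySem.List.sorted_pairwise _ pvK
  · rw [List.pairwise_append]
    refine ⟨PySem.List.sorted_pairwise a pvK, PySem.List.sorted_pairwise b pvK, ?_⟩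
    intro u hu v hv
    exact le_of_lt (hlt u ((PySem.List.mem_sorted _ _ _ _).1 hu) v ((PySem.List.mem_sorted _ _ _ _).1 hv))

-- a member of (l.drop x).take (m - x) is some l[j] with x ≤ j < m
theorem mem_chunk {l : List (String × Int)} {x m : Nat} {p : String × Int}
    (hp : p ∈ (l.drop x).take (m - x)) :
    ∃ j, x ≤ j ∧ j < m ∧ ∃ hj : j < l.length, p = l[j] := by
  obtain ⟨k, hk, he⟩ := List.mem_iff_getElem.1 hp
  have hk1 : k < m - x := lt_of_lt_of_le hk (by simp [List.length_take])
  have hk2 : k < (l.drop x).length := lt_of_lt_of_le hk (by simp [List.length_take])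
  have hk3 : x + k < l.length := by simp [List.length_drop] at hk2; omega
  refine ⟨x + k, by omega, by omega, hk3, ?_⟩
  rw [← he, List.getElem_take, List.getElem_drop]

-- a member of l.drop m is some l[j] with m ≤ j
theorem mem_drop_getElem {l : List (String × Int)} {m : Nat} {p : String × Int}
    (hp : p ∈ l.drop m) :
    ∃ j, m ≤ j ∧ ∃ hj : j < l.length, p = l[j] := by
  obtain ⟨k, hk, he⟩ := List.mem_iff_getElem.1 hp
  have hk3 : m + k < l.length := by simp [List.length_drop] at hk; omega
  exact ⟨m + k, by omega, hk3, by rw [← he, List.getElem_drop]⟩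

-- the loop invariant: the pending region l[x:i] has the same number as l[i], and the loop
-- flushes final ++ sorted(l[x:], pvK)
theorem loop_eq (l : List (String × Int)) (hp : l.Pairwise (fun a b => a.2 ≤ b.2)) :
    ∀ n i x final, l.length - i ≤ n → x ≤ i → i ≤ l.length →
    (i = l.length → x = i) →
    (∀ hi0 : i < l.length, ∀ j (hj : j < l.length), x ≤ j → j < i →
      (l[j]'hj).2 = (l[i]'hi0).2) →
    ordena_intersecoes_loop l i x final = final ++ PySem.List.sorted (l.drop x) pvK false := by
  have hpg := List.pairwise_iff_getElem.1 hp
  intro n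
  induction n with
  | zero =>
    intro i x final hn hxi hil hend _
    have hi : i = l.length := by omega
    have hx : x = i := hend hi
    rw [ordena_intersecoes_loop]
    simp [hx, hi, PySem.List.sorted]
  | succ n ih =>
    intro i x final hn hxi hil hend hchunk
    rw [ordena_intersecoes_loop]
    by_cases hi : i < l.length
    · simp only [dif_pos hi]
      have hcast : ((i : Int) + 1) = ((i + 1 : Nat) : Int) := by push_cast; ring
      by_cases hi1 : i + 1 < l.length
      · have hget : PySem.List.pyGet? l ((i : Int) + 1) = some (l[i+1]) := by
          rw [hcast, PySem.List.pyGet?_natCast, List.getElem?_eq_getElem hi1]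
        rw [hget]
        by_cases hlt : l[i].2 < (l[i+1]).2
        · simp only [if_pos hlt]
          rw [ih (i+1) (i+1) _ (by omega) le_rfl (by omega) (by omega)
            (by intro _ j hj h1 h2; omega)]
          -- flush the chunk l[x:i+1]
          have hslice : PySem.List.slice l (some (x : Int)) (some ((i : Int) + 1))
              = (l.drop x).take (i + 1 - x) := by
            rw [hcast, PySem.List.slice_natCast]
          have hsame : ∀ p ∈ (l.drop x).take (i + 1 - x), p.2 = l[i].2 := by
            intro p hpm
            obtain ⟨j, hxj, hjm, hj, rfl⟩ := mem_chunk hpm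
            rcases Nat.lt_or_ge j i with h | h
            · exact hchunk hi j hj hxj h
            · have : j = i := by omega
              subst this; rfl
          have hcross : ∀ u ∈ (l.drop x).take (i + 1 - x), ∀ v ∈ l.drop (i+1),
              pvK u < pvK v := by
            intro u hu v hv
            obtain ⟨j, hij, hj, rfl⟩ := mem_drop_getElem hv
            have hu2 : u.2 = l[i].2 := hsame u hu
            have hv2 : (l[i+1]).2 ≤ (l[j]'hj).2 := by
              rcases Nat.lt_or_ge (i+1) j with h | h
              · exact hpg (i+1) j hi1 hj h
              · have : j = i + 1 := by omega
                subst this; exact le_rfl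
            rw [pvK, pvK, Prod.Lex.lt_iff]
            simp only [ofLex_toLex]
            exact Or.inl (by rw [hu2]; exact lt_of_lt_of_le hlt hv2)
          have hdx : l.drop x = (l.drop x).take (i + 1 - x) ++ l.drop (i+1) := by
            conv_lhs => rw [← List.take_append_drop (i + 1 - x) (l.drop x)]
            rw [List.drop_drop]
            congr 2
            omega
          rw [hslice, chunk_sort_eq _ (l[i].2) hsame, List.append_assoc]
          congr 1
          rw [hdx, sorted_append_split _ _ hcross, ← hdx]
        · simp only [if_neg hlt]
          have heq : l[i].2 = (l[i+1]).2 :=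
            le_antisymm (hpg i (i+1) hi hi1 (by omega)) (le_of_not_gt hlt)
          rw [ih (i+1) x _ (by omega) (by omega) (by omega) (by omega)
            (by
              intro _ j hj h1 h2
              rcases Nat.lt_or_ge j i with h | h
              · exact (hchunk hi j hj h1 h).trans heq
              · have : j = i := by omega
                subst this; exact heq)]
      · -- i+1 = len(l_inters): IndexError, the except branch
        have hget : PySem.List.pyGet? l ((i : Int) + 1) = none := by
          rw [hcast, PySem.List.pyGet?_natCast, List.getElem?_eq_none (by omega)]
        rw [hget]
        have hslice : PySem.List.slice l (some (x : Int)) (some (l.length : Int))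
            = l.drop x := by
          rw [PySem.List.slice_natCast, List.take_of_length_le (by simp [List.length_drop])]
        have hsame : ∀ p ∈ l.drop x, p.2 = l[i].2 := by
          intro p hpm
          obtain ⟨j, hxj, hj, rfl⟩ := mem_drop_getElem hpm
          rcases Nat.lt_or_ge j i with h | h
          · exact hchunk hi j hj hxj h
          · have : j = i := by omega
            subst this; rfl
        rw [hslice, chunk_sort_eq _ (l[i].2) hsame]
    · simp only [dif_neg hi]
      have heq : i = l.length := by omega
      have hx : x = i := hend heq
      simp [hx, heq, PySem.List.sorted]

-- ===== VERDICT (by name: the statement is the Claim_ definition above) =====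
theorem ordena_intersecoes_spec : Claim_equal_ordena_intersecoes := by
  intro t _
  show ordena_intersecoes t = ordena_intersecoes_alt t
  unfold ordena_intersecoes ordena_intersecoes_alt
  rw [loop_eq (PySem.List.sorted t (fun x => x.2) false)
      (PySem.List.sorted_pairwise t (fun x => x.2))
      (PySem.List.sorted t (fun x => x.2) false).length 0 0 []
      le_rfl le_rfl (Nat.zero_le _) (fun _ => rfl) (by intro _ j hj h1 h2; omega)]
  rw [List.drop_zero, List.nil_append,
    PySem.List.sorted_eq_sorted_of_perm _ t pvK pvK_inj (PySem.List.sorted_perm t _ false),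
    sorted2_eq_sorted_lex]
  rfl
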